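-- pv_equiv track=rewrite | github.com/SeyitAhmetKARACA/GTU_Homeworks_SeyitAhmetKARACA | cse321-Introduction-To-Algorithm-Design/141044084_hw4/141044084/soru2.py | Reconstitute
-- ===== SOURCE A (Python) =====
-- def ReconstituteHelper(s1, d1):
--     for item in d1:
--         if len(item) <= len(s1) and item in s1[0:len(item)]:
--             return d1.index(item)
--     return -1
--
-- def Reconstitute(s, d):
--     R = []
--     for i in range(len(s)-1,-1,-1):
--         cv = ReconstituteHelper(s[i:len(s)], d)
--         if cv != -1:
--             for qw in range(0, len(d[cv])):
--                 R.append(cv)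
--     return R[::-1]
-- ===== SOURCE B (Python) =====
-- def Reconstitute(s, d):
--     n = len(s)
--     assigned = [None] * n
--     for j, w in enumerate(d):
--         for i in range(n):
--             if assigned[i] is None and s.startswith(w, i):
--                 assigned[i] = j
--     R = []
--     for i in range(n):
--         j = assigned[i]
--         if j is not None:
--             R.extend([j] * len(d[j]))
--     return R
-- ===== Notes on version B (the rewrite author's own statement) =====
-- stated objective: alternative
-- what changed: B inverts the loop nesting: instead of A's per-position rescan of the whole dictionary (building the answer backwards and reversing), B makes one dictionary-outer pass that fills a first-match table over positions (first matching word wins via a skip of already-assigned slots) and then builds the result forward from the table.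
import Mathlib
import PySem

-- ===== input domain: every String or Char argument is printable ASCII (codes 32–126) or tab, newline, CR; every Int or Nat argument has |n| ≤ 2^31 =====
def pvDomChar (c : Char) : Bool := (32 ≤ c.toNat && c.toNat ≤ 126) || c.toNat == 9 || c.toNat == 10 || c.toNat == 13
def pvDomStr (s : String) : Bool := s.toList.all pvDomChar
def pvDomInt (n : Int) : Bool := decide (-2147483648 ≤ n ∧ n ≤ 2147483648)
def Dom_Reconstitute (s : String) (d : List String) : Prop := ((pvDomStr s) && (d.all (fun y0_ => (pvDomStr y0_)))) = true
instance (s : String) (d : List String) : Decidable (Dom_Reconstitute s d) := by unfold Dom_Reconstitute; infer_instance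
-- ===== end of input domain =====

-- B replaces A's per-position rescan of the dictionary (plus trailing reversal) by a single
-- dictionary-outer pass maintaining a first-match table, then builds the result forward (objective: alternative decomposition).

-- ===== PORT A =====
-- 'for item in d1: if len(item) <= len(s1) and item in s1[0:len(item)]: return d1.index(item)'; strings as List Char
def ReconstituteHelperGo (d1 : List String) (s1 : List Char) : List String → Int
  | [] => -1
  | item :: rest =>
    if item.toList.length ≤ s1.length ∧
        PySem.Chars.isIn item.toList (PySem.List.slice s1 (some 0) (some (item.toList.length : Int))) = true then
      ((PySem.List.index? d1 item).getD 0 : Nat)  -- d1.index(item); item ∈ d1 here, so index? is always some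
    else ReconstituteHelperGo d1 s1 rest

def ReconstituteHelper (s1 : List Char) (d1 : List String) : Int :=
  ReconstituteHelperGo d1 s1 d1

def Reconstitute (s : String) (d : List String) : List Int :=
  let n : Int := (s.toList.length : Int)
  let R : List Int :=
    (PySem.List.pyRange (n - 1) (-1) (-1)).foldl (fun R i =>
      let cv := ReconstituteHelper (PySem.List.slice s.toList (some i) (some n)) d
      if cv ≠ -1 then
        (PySem.List.pyRange 0 ((PySem.List.pyGetD d cv "").toList.length : Int) 1).foldl
          (fun R _ => R ++ [cv]) R
      else R) []
  (PySem.List.slice? R none none (-1)).getD []  -- R[::-1]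

-- ===== PORT B =====
-- one pass of B's inner loop for word w at dictionary index j: entry at position i is paired with the suffix s[i:]
def assignWord (w : List Char) (j : Int) : List Char → List (Option Int) → List (Option Int)
  | _, [] => []
  | t, a :: rest =>
    (if a = none ∧ PySem.Chars.startswith t w = true then some j else a) :: assignWord w j t.tail rest

def Reconstitute_alt (s : String) (d : List String) : List Int :=
  let t := s.toList
  let assigned := (PySem.List.enumerate d).foldl (fun A p => assignWord p.2.toList p.1 t A)
      (List.replicate t.length (none : Option Int))
  assigned.foldl (fun R a =>
    match a with
    | some j => R ++ List.replicate (PySem.List.pyGetD d j "").toList.length j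
    | none => R) []

-- ===== PRECONDITION & SPEC =====
def Spec_Reconstitute (s : String) (d : List String) (out : List Int) : Prop := out = Reconstitute_alt s d
instance (s : String) (d : List String) (out : List Int) : Decidable (Spec_Reconstitute s d out) := by unfold Spec_Reconstitute; infer_instance

-- ===== CLAIM (what is proved, stated in full; the proofs are below) =====
def Claim_equal_Reconstitute : Prop := ∀ (s : String) (d : List String), Dom_Reconstitute s d → Spec_Reconstitute s d (Reconstitute s d)

-- ===== LEMMAS AND PROOFS =====

-- index of the first word of d that is a prefix of u
def firstIdx : List String → List Char → Option Nat
  | [], _ => none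
  | w :: ws, u => if w.toList <+: u then some 0 else (firstIdx ws u).map (· + 1)

-- the block both programs emit for the suffix u
def outBlock (d : List String) (u : List Char) : List Int :=
  match firstIdx d u with
  | some j => List.replicate (PySem.List.pyGetD d ((j : Nat) : Int) "").toList.length ((j : Nat) : Int)
  | none => []

-- a table indexed by the suffixes of u
def suffTab (f : List Char → Option Int) : List Char → List (Option Int)
  | [] => []
  | c :: u => f (c :: u) :: suffTab f u

theorem cond_iff (w : String) (u : List Char) :
    (w.toList.length ≤ u.length ∧
      PySem.Chars.isIn w.toList (PySem.List.slice u (some 0) (some (w.toList.length : Int))) = true)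
    ↔ w.toList <+: u := by
  rw [PySem.List.slice_zero_start, PySem.List.slice_to_natCast, PySem.Chars.isIn_iff_infix]
  constructor
  · rintro ⟨hl, hin⟩
    have := hin.eq_of_length_le (by simp)
    rw [this]
    exact u.take_prefix _
  · intro h
    refine ⟨h.length_le, ?_⟩
    rw [← List.prefix_iff_eq_take.mp h]

theorem index?_pre_append {α : Type} [BEq α] [LawfulBEq α] (pre suf : List α) (v : α) (hv : v ∉ pre) :
    PySem.List.index? (pre ++ v :: suf) v = some pre.length := by
  induction pre with
  | nil => simpa using PySem.List.index?_cons_self v suf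
  | cons x xs ih =>
    have hx : x ≠ v := by intro h; exact hv (h ▸ List.mem_cons_self)
    have hxs : v ∉ xs := fun h => hv (List.mem_cons_of_mem _ h)
    rw [List.cons_append, PySem.List.index?_cons_of_ne _ hx, ih hxs]
    simp

theorem helperGo_eq (d : List String) (u : List Char) :
    ∀ (rest pre : List String), d = pre ++ rest → (∀ w ∈ pre, ¬ w.toList <+: u) →
    ReconstituteHelperGo d u rest =
      (match firstIdx rest u with
       | some j => ((pre.length + j : Nat) : Int)
       | none => -1) := by
  intro rest
  induction rest with
  | nil => intro pre _ _; simp [ReconstituteHelperGo, firstIdx]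
  | cons item rest ih =>
    intro pre hd hpre
    rw [ReconstituteHelperGo, firstIdx]
    by_cases hp : item.toList <+: u
    · rw [if_pos ((cond_iff item u).mpr hp), if_pos hp]
      have hnotpre : item ∉ pre := fun hmem => hpre item hmem hp
      rw [hd, index?_pre_append pre rest item hnotpre]
      simp
    · rw [if_neg (fun hc => hp ((cond_iff item u).mp hc)), if_neg hp]
      have hd' : d = (pre ++ [item]) ++ rest := by rw [hd]; simp
      have hpre' : ∀ w ∈ pre ++ [item], ¬ w.toList <+: u := by
        intro w hw
        rcases List.mem_append.mp hw with h | h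
        · exact hpre w h
        · simp at h; exact h ▸ hp
      rw [ih (pre ++ [item]) hd' hpre']
      cases firstIdx rest u with
      | none => rfl
      | some j => simp; ring

theorem helper_eq (d : List String) (u : List Char) :
    ReconstituteHelper u d =
      (match firstIdx d u with
       | some j => ((j : Nat) : Int)
       | none => -1) := by
  rw [ReconstituteHelper, helperGo_eq d u d [] rfl (by simp)]
  cases firstIdx d u <;> simp

theorem outBlock_reverse (d : List String) (u : List Char) :
    (outBlock d u).reverse = outBlock d u := by
  rw [outBlock]; cases firstIdx d u <;> simp

theorem A_eq (s : String) (d : List String) :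
    Reconstitute s d =
      (List.range s.toList.length).flatMap (fun k => outBlock d (s.toList.drop k)) := by
  unfold Reconstitute
  dsimp only
  rw [PySem.List.slice?_none_none_neg_one]
  simp only [Option.getD_some]
  rw [PySem.List.foldl_congr_mem _ _ (fun R i => R ++ outBlock d (s.toList.drop i.toNat)) _ ?hcongr]
  case hcongr =>
    intro acc i hi
    obtain ⟨h1, h2⟩ := PySem.List.mem_pyRange_neg_one.mp hi
    have h0 : 0 ≤ i := by omega
    dsimp only
    rw [PySem.List.slice_toNat s.toList h0 (Int.natCast_nonneg _),
        List.take_of_length_le (by simp), helper_eq]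
    cases hF : firstIdx d (s.toList.drop i.toNat) with
    | none => rw [if_neg (by simp), outBlock, hF]; simp
    | some j =>
      rw [if_pos (by simp), PySem.List.foldl_append_singleton_eq_map (f := fun _ => ((j : Nat) : Int)),
          List.map_const', PySem.List.length_pyRange_one, outBlock, hF]
      simp
  rw [PySem.List.foldl_append_eq_flatMap, PySem.List.pyRange_neg_one_eq_reverse]
  simp only [neg_add_cancel, sub_add_cancel, List.nil_append]
  rw [List.reverse_flatMap]
  simp only [List.reverse_reverse]
  rw [PySem.List.pyRange_one, List.flatMap_map]
  simp [outBlock_reverse]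

theorem replicate_none_eq_suffTab (u : List Char) :
    List.replicate u.length (none : Option Int) = suffTab (fun _ => none) u := by
  induction u with
  | nil => rfl
  | cons c u ih => simp [suffTab, List.replicate, ih]

theorem suffTab_congr {f g : List Char → Option Int} (h : ∀ v, f v = g v) (u : List Char) :
    suffTab f u = suffTab g u := by
  induction u with
  | nil => rfl
  | cons c u ih => simp [suffTab, h, ih]

theorem assignWord_suffTab (w : List Char) (j : Int) (u : List Char) (f : List Char → Option Int) :
    assignWord w j u (suffTab f u) =
      suffTab (fun v => if f v = none ∧ PySem.Chars.startswith v w = true then some j else f v) u := by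
  induction u with
  | nil => rfl
  | cons c u ih => simp [suffTab, assignWord, ih]

theorem foldAssign (u : List Char) :
    ∀ (ws : List String) (m : Nat) (f : List Char → Option Int),
    (PySem.List.enumerate ws (m : Int)).foldl (fun A p => assignWord p.2.toList p.1 u A) (suffTab f u)
    = suffTab (fun v =>
        match f v with
        | some j => some j
        | none => (firstIdx ws v).map (fun k => ((m + k : Nat) : Int))) u := by
  intro ws
  induction ws with
  | nil =>
    intro m f
    simp only [PySem.List.enumerate, List.foldl_nil]
    apply suffTab_congr
    intro v
    cases f v <;> simp [firstIdx]
  | cons w ws ih =>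
    intro m f
    rw [PySem.List.enumerate_cons, List.foldl_cons, assignWord_suffTab]
    have hcast : (m : Int) + 1 = ((m + 1 : Nat) : Int) := by push_cast; ring
    rw [hcast, ih (m + 1)]
    apply suffTab_congr
    intro v
    cases hfv : f v with
    | some j => simp
    | none =>
      by_cases hp : w.toList <+: v
      · have hs : PySem.Chars.startswith v w.toList = true := (PySem.Chars.startswith_iff v w.toList).mpr hp
        simp [hs, firstIdx, hp]
      · have hs : PySem.Chars.startswith v w.toList = false := by
          rw [Bool.eq_false_iff]
          intro hc
          exact hp ((PySem.Chars.startswith_iff v w.toList).mp hc)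
        rw [firstIdx, if_neg hp]
        cases hk : firstIdx ws v with
        | none => simp [hs]
        | some k =>
          simp [hs]
          ring

theorem suffTab_eq_map (f : List Char → Option Int) (u : List Char) :
    suffTab f u = (List.range u.length).map (fun k => f (u.drop k)) := by
  induction u with
  | nil => rfl
  | cons c u ih => simp [suffTab, List.range_succ_eq_map, ih, List.map_map, Function.comp]

theorem B_eq (s : String) (d : List String) :
    Reconstitute_alt s d =
      (List.range s.toList.length).flatMap (fun k => outBlock d (s.toList.drop k)) := by
  unfold Reconstitute_alt
  dsimp only
  rw [replicate_none_eq_suffTab, show (0 : Int) = ((0 : Nat) : Int) by simp,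
      foldAssign s.toList d 0 (fun _ => none)]
  rw [PySem.List.foldl_congr_mem _ _
      (fun R a => R ++ (match a with
        | some j => List.replicate (PySem.List.pyGetD d j "").toList.length j
        | none => ([] : List Int))) _ (by intro acc x _; cases x <;> simp)]
  rw [PySem.List.foldl_append_eq_flatMap, suffTab_eq_map, List.flatMap_map]
  simp only [List.nil_append]
  congr 1
  funext k
  cases hF : firstIdx d (s.toList.drop k) with
  | none => simp [hF, outBlock]
  | some j => simp [hF, outBlock]

-- ===== VERDICT (by name: the statement is the Claim_ definition above) =====
theorem Reconstitute_spec : Claim_equal_Reconstitute := by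
  intro s d _
  show Reconstitute s d = Reconstitute_alt s d
  rw [A_eq, B_eq]
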